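-- pv_equiv track=rewrite | github.com/IvanTPL/Big-Data-Computing-23-24 | G004HW2.py | calculate_rs
-- ===== SOURCE A (Python) =====
-- def calculate_rs(lst_cells):
--     d = {}
--     for i in range(len(lst_cells)):
--         if d.get(lst_cells[i][0]) is None:
--             d[lst_cells[i][0]] = [lst_cells[i][1], lst_cells[i][1], lst_cells[i][1]]
--         for j in range(i+1, len(lst_cells)):
--             if d.get(lst_cells[j][0]) is None:
--                 d[lst_cells[j][0]] = [lst_cells[j][1], lst_cells[j][1], lst_cells[j][1]]
--             if (lst_cells[j][0][0] >= lst_cells[i][0][0] - 3) & (lst_cells[j][0][0] <= lst_cells[i][0][0] + 3) & (lst_cells[j][0][1] >= lst_cells[i][0][1] - 3) & (lst_cells[j][0][1] <= lst_cells[i][0][1] + 3):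
--                 d[lst_cells[i][0]][1] += lst_cells[j][1]
--                 d[lst_cells[j][0]][1] += lst_cells[i][1]
--             if (lst_cells[j][0][0] >= lst_cells[i][0][0] - 1) & (lst_cells[j][0][0] <= lst_cells[i][0][0] + 1) & (lst_cells[j][0][1] >= lst_cells[i][0][1] - 1) & (lst_cells[j][0][1] <= lst_cells[i][0][1] + 1):
--                 d[lst_cells[i][0]][0] += lst_cells[j][1]
--                 d[lst_cells[j][0]][0] += lst_cells[i][1]
--     return [(k, d[k]) for k in d.keys()]
-- ===== SOURCE B (Python) =====
-- def calculate_rs(lst_cells):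
--     # One pass: total count per coordinate, then per element add the counts of all
--     # other elements in its 3x3 / 7x7 box via 9 / 49 hash lookups (O(n) vs O(n^2)).
--     tot = {}
--     for (p, c) in lst_cells:
--         tot[p] = tot.get(p, 0) + c
--     d = {}
--     for (p, c) in lst_cells:
--         if p not in d:
--             d[p] = [c, c, c]
--         (x, y) = p
--         s3 = 0
--         for dx in range(-1, 2):
--             for dy in range(-1, 2):
--                 s3 += tot.get((x + dx, y + dy), 0)
--         s7 = 0
--         for dx in range(-3, 4):
--             for dy in range(-3, 4):
--                 s7 += tot.get((x + dx, y + dy), 0)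
--         d[p][0] += s3 - c
--         d[p][1] += s7 - c
--     return list(d.items())
-- ===== Notes on version B (the rewrite author's own statement) =====
-- stated objective: faster
-- what changed: A sums pair contributions over all O(n^2) index pairs with nested loops; B builds a per-coordinate total-count dict in one pass and then, for each element, sums the totals of the fixed 9 / 49 neighbour-offset cells via hash lookups, subtracting the element's own count.
import Mathlib
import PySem

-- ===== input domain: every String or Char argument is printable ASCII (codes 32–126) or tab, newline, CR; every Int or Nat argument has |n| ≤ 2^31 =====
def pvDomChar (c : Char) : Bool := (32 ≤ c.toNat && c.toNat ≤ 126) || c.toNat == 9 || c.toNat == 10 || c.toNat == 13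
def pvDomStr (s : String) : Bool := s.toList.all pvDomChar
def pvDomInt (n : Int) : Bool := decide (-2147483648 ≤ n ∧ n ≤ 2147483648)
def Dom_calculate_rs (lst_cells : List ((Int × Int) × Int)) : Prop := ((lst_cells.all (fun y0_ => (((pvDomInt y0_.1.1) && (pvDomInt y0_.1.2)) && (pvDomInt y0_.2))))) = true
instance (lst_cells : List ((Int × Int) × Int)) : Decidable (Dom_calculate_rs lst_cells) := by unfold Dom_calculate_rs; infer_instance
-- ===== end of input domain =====

-- B replaces A's O(n^2) all-pairs double loop by one pass over a per-coordinate
-- total-count dict with 9 / 49 fixed neighbour-offset lookups per element (faster).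

-- ===== PORT A =====
-- d[k][slot] += x on the stored 3-element list (Python list element assignment)
def pvBump (v : List Int) (slot : Nat) (x : Int) : List Int := v.set slot (v.getD slot 0 + x)

-- literal transliteration of A: nested index loops over range(len), dict of 3-lists
def calculate_rs (lst_cells : List ((Int × Int) × Int)) : List ((Int × Int) × List Int) :=
  let n : Int := PySem.List.len lst_cells
  let d : PySem.Dict (Int × Int) (List Int) :=
    (PySem.List.pyRange 0 n 1).foldl (fun d i =>
      let ci := PySem.List.pyGetD lst_cells i ((0, 0), 0)
      let d := if (d.get? ci.1).isNone then d.insert ci.1 [ci.2, ci.2, ci.2] else d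
      (PySem.List.pyRange (i + 1) n 1).foldl (fun d j =>
        let cj := PySem.List.pyGetD lst_cells j ((0, 0), 0)
        let d := if (d.get? cj.1).isNone then d.insert cj.1 [cj.2, cj.2, cj.2] else d
        let d := if (cj.1.1 ≥ ci.1.1 - 3) && (cj.1.1 ≤ ci.1.1 + 3) && (cj.1.2 ≥ ci.1.2 - 3) && (cj.1.2 ≤ ci.1.2 + 3) then
            (d.modify ci.1 [] (fun v => pvBump v 1 cj.2)).modify cj.1 [] (fun v => pvBump v 1 ci.2)
          else d
        if (cj.1.1 ≥ ci.1.1 - 1) && (cj.1.1 ≤ ci.1.1 + 1) && (cj.1.2 ≥ ci.1.2 - 1) && (cj.1.2 ≤ ci.1.2 + 1) then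
            (d.modify ci.1 [] (fun v => pvBump v 0 cj.2)).modify cj.1 [] (fun v => pvBump v 0 ci.2)
        else d) d) PySem.Dict.empty
  d.items

-- ===== PORT B =====
-- literal transliteration of B (Source B): totals per coordinate, then one pass with
-- 9 / 49 neighbour-offset lookups per element
def calculate_rs_alt (lst_cells : List ((Int × Int) × Int)) : List ((Int × Int) × List Int) :=
  let tot : PySem.Dict (Int × Int) Int :=
    lst_cells.foldl (fun tot pc => tot.insert pc.1 (tot.getD pc.1 0 + pc.2)) PySem.Dict.empty
  let d : PySem.Dict (Int × Int) (List Int) :=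
    lst_cells.foldl (fun d pc =>
      let d := if ¬ d.contains pc.1 then d.insert pc.1 [pc.2, pc.2, pc.2] else d
      let x := pc.1.1
      let y := pc.1.2
      let s3 : Int := (PySem.List.pyRange (-1) 2 1).foldl (fun s dx =>
        (PySem.List.pyRange (-1) 2 1).foldl (fun s dy =>
          s + tot.getD (x + dx, y + dy) 0) s) 0
      let s7 : Int := (PySem.List.pyRange (-3) 4 1).foldl (fun s dx =>
        (PySem.List.pyRange (-3) 4 1).foldl (fun s dy =>
          s + tot.getD (x + dx, y + dy) 0) s) 0
      let d := d.modify pc.1 [] (fun v => pvBump v 0 (s3 - pc.2))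
      d.modify pc.1 [] (fun v => pvBump v 1 (s7 - pc.2))) PySem.Dict.empty
  d.items

-- ===== PRECONDITION & SPEC =====
def Spec_calculate_rs (lst_cells : List ((Int × Int) × Int)) (out : List ((Int × Int) × List Int)) : Prop := out = calculate_rs_alt lst_cells
instance (lst_cells : List ((Int × Int) × Int)) (out : List ((Int × Int) × List Int)) : Decidable (Spec_calculate_rs lst_cells out) := by unfold Spec_calculate_rs; infer_instance

-- ===== CLAIM (what is proved, stated in full; the proofs are below) =====
def Claim_equal_calculate_rs : Prop := ∀ (lst_cells : List ((Int × Int) × Int)), Dom_calculate_rs lst_cells → Spec_calculate_rs lst_cells (calculate_rs lst_cells)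


-- ===== LEMMAS AND PROOFS =====

-- Chebyshev-box test of A's two conditions (radius r), as A writes it
def pvNear (r : Int) (p q : Int × Int) : Bool :=
  (q.1 ≥ p.1 - r) && (q.1 ≤ p.1 + r) && (q.2 ≥ p.2 - r) && (q.2 ≤ p.2 + r)

-- sum of counts of the elements of l lying in the r-box around k
def pvS (r : Int) (k : Int × Int) (l : List ((Int × Int) × Int)) : Int :=
  (l.map (fun pc => if pvNear r k pc.1 then pc.2 else 0)).sum

-- total count at coordinate k
def pvTot (k : Int × Int) (l : List ((Int × Int) × Int)) : Int :=
  (l.map (fun pc => if pc.1 = k then pc.2 else 0)).sum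

-- multiplicity of coordinate k
def pvCnt (k : Int × Int) (l : List ((Int × Int) × Int)) : Int :=
  ((l.map Prod.fst).count k : Int)

-- count of the first element at coordinate k (0 if none)
def pvFst (k : Int × Int) (l : List ((Int × Int) × Int)) : Int :=
  match l.find? (fun pc => pc.1 == k) with
  | some pc => pc.2
  | none => 0

-- the common closed-form value both programs compute at key k
def pvVal (l : List ((Int × Int) × Int)) (k : Int × Int) : List Int :=
  [pvFst k l + pvCnt k l * pvS 1 k l - pvTot k l,
   pvFst k l + pvCnt k l * pvS 3 k l - pvTot k l,
   pvFst k l]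

def pvTarget (l : List ((Int × Int) × Int)) : List ((Int × Int) × List Int) :=
  (PySem.Set.ofList (l.map Prod.fst)).map (fun k => (k, pvVal l k))

-- add a0 to slot 0 and a1 to slot 1 of a 3-list
def pvUpd (v : List Int) (a0 a1 : Int) : List Int :=
  [v.getD 0 0 + a0, v.getD 1 0 + a1, v.getD 2 0]

def pvShape (d : PySem.Dict (Int × Int) (List Int)) : Prop :=
  ∀ k, d.contains k = true → ∃ a b e, d.getD k [] = [a, b, e]

-- ---- structural reading of A's loops ----
def pvInit (c : (Int × Int) × Int) (d : PySem.Dict (Int × Int) (List Int)) :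
    PySem.Dict (Int × Int) (List Int) :=
  if (d.get? c.1).isNone then d.insert c.1 [c.2, c.2, c.2] else d

def pvStepA (c : (Int × Int) × Int) (d : PySem.Dict (Int × Int) (List Int))
    (cj : (Int × Int) × Int) : PySem.Dict (Int × Int) (List Int) :=
  let d := pvInit cj d
  let d := if pvNear 3 c.1 cj.1 then
      (d.modify c.1 [] (fun v => pvBump v 1 cj.2)).modify cj.1 [] (fun v => pvBump v 1 c.2)
    else d
  if pvNear 1 c.1 cj.1 then
      (d.modify c.1 [] (fun v => pvBump v 0 cj.2)).modify cj.1 [] (fun v => pvBump v 0 c.2)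
  else d

def pvInnerA (c : (Int × Int) × Int) (rest : List ((Int × Int) × Int))
    (d : PySem.Dict (Int × Int) (List Int)) : PySem.Dict (Int × Int) (List Int) :=
  rest.foldl (pvStepA c) d

def pvARec : List ((Int × Int) × Int) → PySem.Dict (Int × Int) (List Int) →
    PySem.Dict (Int × Int) (List Int)
  | [], d => d
  | c :: rest, d => pvARec rest (pvInnerA c rest (pvInit c d))

-- pairwise additions contributed by A's loops to key k
def pvIA (r : Int) (c : (Int × Int) × Int) (k : Int × Int)
    (rest : List ((Int × Int) × Int)) : Int :=
  (if k = c.1 then pvS r c.1 rest else 0) +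
  (if pvNear r c.1 k then pvCnt k rest * c.2 else 0)

def pvPA (r : Int) (k : Int × Int) : List ((Int × Int) × Int) → Int
  | [] => 0
  | c :: rest => pvIA r c k rest + pvPA r k rest

-- ---- structural reading of B's loops ----
def pvTotD (l : List ((Int × Int) × Int)) : PySem.Dict (Int × Int) Int :=
  l.foldl (fun tot pc => tot.insert pc.1 (tot.getD pc.1 0 + pc.2)) PySem.Dict.empty

def pvStepB (tot : PySem.Dict (Int × Int) Int) (d : PySem.Dict (Int × Int) (List Int))
    (pc : (Int × Int) × Int) : PySem.Dict (Int × Int) (List Int) :=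
  let d := if ¬ d.contains pc.1 then d.insert pc.1 [pc.2, pc.2, pc.2] else d
  let x := pc.1.1
  let y := pc.1.2
  let s3 : Int := (PySem.List.pyRange (-1) 2 1).foldl (fun s dx =>
    (PySem.List.pyRange (-1) 2 1).foldl (fun s dy =>
      s + tot.getD (x + dx, y + dy) 0) s) 0
  let s7 : Int := (PySem.List.pyRange (-3) 4 1).foldl (fun s dx =>
    (PySem.List.pyRange (-3) 4 1).foldl (fun s dy =>
      s + tot.getD (x + dx, y + dy) 0) s) 0
  let d := d.modify pc.1 [] (fun v => pvBump v 0 (s3 - pc.2))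
  d.modify pc.1 [] (fun v => pvBump v 1 (s7 - pc.2))

-- per-element additions in B to key k (T is the box sum at k)
def pvQ (T : Int) (k : Int × Int) (l : List ((Int × Int) × Int)) : Int :=
  (l.map (fun pc => if pc.1 = k then T - pc.2 else 0)).sum

-- ---- basic facts ----
lemma pvNear_refl (r : Int) (hr : 0 ≤ r) (p : Int × Int) : pvNear r p p = true := by
  simp [pvNear]; omega

lemma pvNear_symm (r : Int) (p q : Int × Int) : pvNear r p q = pvNear r q p := by
  rw [Bool.eq_iff_iff]; simp [pvNear]; omega

lemma pvBump0 (a b e x : Int) : pvBump [a, b, e] 0 x = [a + x, b, e] := rfl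

lemma pvBump1 (a b e x : Int) : pvBump [a, b, e] 1 x = [a, b + x, e] := rfl

lemma pvUpd_upd (v : List Int) (a0 a1 b0 b1 : Int) :
    pvUpd (pvUpd v a0 a1) b0 b1 = pvUpd v (a0 + b0) (a1 + b1) := by
  simp [pvUpd]; omega

-- closed forms of the addition totals
lemma pvQ_closed (T : Int) (k : Int × Int) (l : List ((Int × Int) × Int)) :
    pvQ T k l = pvCnt k l * T - pvTot k l := by
  induction l with
  | nil => simp [pvQ, pvCnt, pvTot]
  | cons pc rest ih =>
    simp only [pvQ, pvCnt, pvTot, List.map_cons, List.sum_cons, List.count_cons] at *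
    by_cases h : pc.1 = k <;> simp [h, ih] <;> push_cast <;> ring

lemma pvPA_closed (r : Int) (hr : 0 ≤ r) (k : Int × Int) (l : List ((Int × Int) × Int)) :
    pvPA r k l = pvCnt k l * pvS r k l - pvTot k l := by
  induction l with
  | nil => simp [pvPA, pvCnt, pvTot]
  | cons c rest ih =>
    simp only [pvPA, pvIA, pvS, pvCnt, pvTot, List.map_cons, List.sum_cons,
      List.count_cons, ih]
    by_cases h : k = c.1
    · subst h
      simp [pvNear_refl r hr, pvNear_symm, pvS, pvCnt, pvTot]
      push_cast
      ring
    · have h' : ¬ (c.1 = k) := fun hh => h hh.symm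
      rw [pvNear_symm]
      by_cases hn : pvNear r k c.1 = true <;>
        simp [h, h', hn, pvS, pvCnt, pvTot] <;> push_cast <;> ring

-- ---- B: the tot dict and the box sums ----
lemma pvTotD_getD_aux (l : List ((Int × Int) × Int)) (k : Int × Int) :
    ∀ t0 : PySem.Dict (Int × Int) Int,
      (l.foldl (fun t pc => t.insert pc.1 (t.getD pc.1 0 + pc.2)) t0).getD k 0 =
        t0.getD k 0 + pvTot k l := by
  induction l with
  | nil => intro t0; simp [pvTot]
  | cons pc rest ih =>
    intro t0
    simp only [List.foldl_cons, ih, PySem.Dict.getD_insert, pvTot, List.map_cons,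
      List.sum_cons]
    by_cases h : k = pc.1
    · subst h; simp; ring
    · have h' : ¬ (pc.1 = k) := fun hh => h hh.symm
      simp [h, h']

lemma pvTotD_getD (l : List ((Int × Int) × Int)) (k : Int × Int) :
    (pvTotD l).getD k 0 = pvTot k l := by
  simp [pvTotD, pvTotD_getD_aux, PySem.Dict.getD_empty]

lemma pvSum1D (a b x t c : Int) :
    ((PySem.List.pyRange a b 1).map (fun dy => if t = x + dy then c else 0)).sum =
      if x + a ≤ t ∧ t < x + b then c else 0 := by
  suffices H : ∀ (n : Nat) (a : Int), (b - a).toNat = n →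
      ((PySem.List.pyRange a b 1).map (fun dy => if t = x + dy then c else 0)).sum =
        if x + a ≤ t ∧ t < x + b then c else 0 from H _ a rfl
  intro n
  induction n with
  | zero =>
    intro a h
    rw [PySem.List.pyRange_one_eq_nil (by omega)]
    simp
    omega
  | succ n ih =>
    intro a h
    rw [PySem.List.pyRange_one_cons (by omega)]
    simp only [List.map_cons, List.sum_cons, ih (a + 1) (by omega)]
    split_ifs <;> omega

lemma pvCellBox (r x y : Int) (q : Int × Int) (c : Int) :
    ((PySem.List.pyRange (-r) (r + 1) 1).map (fun dx =>
      ((PySem.List.pyRange (-r) (r + 1) 1).map (fun dy =>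
        if q = (x + dx, y + dy) then c else 0)).sum)).sum =
      if pvNear r (x, y) q then c else 0 := by
  have hin : ∀ dx : Int,
      ((PySem.List.pyRange (-r) (r + 1) 1).map (fun dy =>
        if q = (x + dx, y + dy) then c else 0)).sum =
      if q.1 = x + dx then (if y + -r ≤ q.2 ∧ q.2 < y + (r + 1) then c else 0) else 0 := by
    intro dx
    by_cases h1 : q.1 = x + dx
    · have hpt : ∀ dy : Int,
          (if q = (x + dx, y + dy) then c else 0) = (if q.2 = y + dy then c else 0) := by
        intro dy
        rcases q with ⟨q1, q2⟩
        simp only [Prod.mk.injEq] at h1 ⊢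
        by_cases h2 : q2 = y + dy <;> simp [Prod.ext_iff, h1, h2]
      simp only [hpt, pvSum1D (-r) (r + 1) y q.2 c]
      simp [h1]
    · have hpt : ∀ dy : Int, (if q = (x + dx, y + dy) then c else 0) = 0 := by
        intro dy
        rcases q with ⟨q1, q2⟩
        simp only [Prod.mk.injEq] at h1 ⊢
        simp [Prod.ext_iff]
        intro hq _
        exact absurd hq h1
      simp [hpt, h1]
  simp only [hin]
  rw [pvSum1D (-r) (r + 1) x q.1]
  split_ifs with h1 h2 h3 <;> simp [pvNear] at * <;> omega

lemma pvBoxTot (r x y : Int) (l : List ((Int × Int) × Int)) :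
    ((PySem.List.pyRange (-r) (r + 1) 1).map (fun dx =>
      ((PySem.List.pyRange (-r) (r + 1) 1).map (fun dy =>
        pvTot (x + dx, y + dy) l)).sum)).sum = pvS r (x, y) l := by
  induction l with
  | nil => simp [pvTot, pvS]
  | cons pc rest ih =>
    have hTot : ∀ k : Int × Int,
        pvTot k (pc :: rest) = (if pc.1 = k then pc.2 else 0) + pvTot k rest := by
      intro k; simp [pvTot]
    have hS : pvS r (x, y) (pc :: rest) =
        (if pvNear r (x, y) pc.1 then pc.2 else 0) + pvS r (x, y) rest := by
      simp [pvS]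
    simp only [hTot, PySem.List.sum_map_add_int]
    rw [hS, ← ih, ← pvCellBox r x y pc.1 pc.2]

lemma pvBox_eval (r : Int) (hr : 0 ≤ r) (x y : Int) (l : List ((Int × Int) × Int)) :
    ((PySem.List.pyRange (-r) (r + 1) 1).map (fun dx =>
      ((PySem.List.pyRange (-r) (r + 1) 1).map (fun dy =>
        (pvTotD l).getD (x + dx, y + dy) 0)).sum)).sum = pvS r (x, y) l := by
  simp only [pvTotD_getD]
  exact pvBoxTot r x y l

-- B's step with the box sums evaluated
lemma pvStepB_eq (lst : List ((Int × Int) × Int)) (d : PySem.Dict (Int × Int) (List Int))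
    (pc : (Int × Int) × Int) :
    pvStepB (pvTotD lst) d pc =
      ((if ¬ d.contains pc.1 then d.insert pc.1 [pc.2, pc.2, pc.2] else d).modify pc.1 []
        (fun v => pvBump v 0 (pvS 1 pc.1 lst - pc.2))).modify pc.1 []
        (fun v => pvBump v 1 (pvS 3 pc.1 lst - pc.2)) := by
  have h1 := pvBox_eval 1 (by norm_num) pc.1.1 pc.1.2 lst
  have h3 := pvBox_eval 3 (by norm_num) pc.1.1 pc.1.2 lst
  norm_num at h1 h3
  unfold pvStepB
  simp only [PySem.List.foldl_add, zero_add, h1, h3, Prod.mk.eta]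

-- ---- B: fold invariants ----
lemma pvStepBE_contains (lst : List ((Int × Int) × Int))
    (d : PySem.Dict (Int × Int) (List Int)) (pc : (Int × Int) × Int) (k : Int × Int) :
    (pvStepB (pvTotD lst) d pc).contains k = (d.contains k || (k == pc.1)) := by
  rw [pvStepB_eq]
  simp only [PySem.Dict.contains_modify]
  by_cases h : d.contains pc.1
  · rw [if_neg (by simp [h])]
    by_cases hk : k = pc.1 <;> simp [hk, h] <;> try exact Bool.or_comm _ _
  · rw [if_pos (by simp [h])]
    simp only [PySem.Dict.contains_insert]
    by_cases hk : k = pc.1 <;> simp [hk, h] <;> try exact Bool.or_comm _ _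

lemma pvStepBE_keys (lst : List ((Int × Int) × Int))
    (d : PySem.Dict (Int × Int) (List Int)) (pc : (Int × Int) × Int) :
    (pvStepB (pvTotD lst) d pc).keys = PySem.Set.add d.keys pc.1 := by
  rw [pvStepB_eq]
  rw [PySem.Dict.keys_modify, PySem.Dict.keys_insert_of_contains _ _
    (by simp [PySem.Dict.contains_modify, PySem.Dict.contains_insert])]
  rw [PySem.Dict.keys_modify, PySem.Dict.keys_insert_of_contains _ _
    (by by_cases h : d.contains pc.1 <;> simp [PySem.Dict.contains_insert, h])]
  by_cases h : d.contains pc.1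
  · rw [if_neg (by simp [h]), PySem.Set.add, if_pos
      (by rw [PySem.Dict.contains_eq_decide_mem_keys] at h; simpa using h)]
  · rw [if_pos (by simp [h]), PySem.Dict.keys_insert_of_not_contains _ _
      (by simp [h]), PySem.Set.add, if_neg
      (by rw [PySem.Dict.contains_eq_decide_mem_keys] at h; simpa using h)]

lemma pvStepBE_getD (lst : List ((Int × Int) × Int))
    (d : PySem.Dict (Int × Int) (List Int)) (pc : (Int × Int) × Int)
    (hsh : pvShape d) (k : Int × Int) :
    (pvStepB (pvTotD lst) d pc).getD k [] =
      if k = pc.1 then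
        pvUpd ((if ¬ d.contains pc.1 then d.insert pc.1 [pc.2, pc.2, pc.2] else d).getD k [])
          (pvS 1 pc.1 lst - pc.2) (pvS 3 pc.1 lst - pc.2)
      else d.getD k [] := by
  rw [pvStepB_eq, PySem.Dict.getD_modify, PySem.Dict.getD_modify]
  by_cases hkp : k = pc.1
  · by_cases h : d.contains pc.1
    · obtain ⟨a, b, e, he⟩ := hsh pc.1 h
      simp [hkp, h, he, pvBump0, pvBump1, pvUpd]
    · simp [hkp, h, PySem.Dict.getD_insert, pvBump0, pvBump1, pvUpd]
  · by_cases h : d.contains pc.1 <;>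
      simp [hkp, h, PySem.Dict.getD_modify, PySem.Dict.getD_insert]

lemma pvStepBE_shape (lst : List ((Int × Int) × Int))
    (d : PySem.Dict (Int × Int) (List Int)) (pc : (Int × Int) × Int) (hsh : pvShape d) :
    pvShape (pvStepB (pvTotD lst) d pc) := by
  intro k hk
  rw [pvStepBE_getD lst d pc hsh k]
  by_cases hkp : k = pc.1
  · rw [if_pos hkp]; exact ⟨_, _, _, rfl⟩
  · rw [if_neg hkp]
    rw [pvStepBE_contains] at hk
    simp [hkp] at hk
    exact hsh k hk

lemma pvFst_cons (k : Int × Int) (pc : (Int × Int) × Int) (l : List ((Int × Int) × Int)) :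
    pvFst k (pc :: l) = if pc.1 = k then pc.2 else pvFst k l := by
  by_cases h : pc.1 = k
  · simp [pvFst, List.find?, h]
  · have hb : (pc.1 == k) = false := beq_eq_false_iff_ne.mpr h
    simp [pvFst, List.find?, hb, h]

lemma pvQ_cons (T : Int) (k : Int × Int) (pc : (Int × Int) × Int)
    (l : List ((Int × Int) × Int)) :
    pvQ T k (pc :: l) = (if pc.1 = k then T - pc.2 else 0) + pvQ T k l := by
  simp [pvQ]

lemma pvBFold_keys (lst l : List ((Int × Int) × Int))
    (d : PySem.Dict (Int × Int) (List Int)) :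
    (l.foldl (pvStepB (pvTotD lst)) d).keys = PySem.Set.update d.keys (l.map Prod.fst) := by
  induction l generalizing d with
  | nil => rfl
  | cons pc rest ih =>
    simp only [List.foldl_cons, ih, pvStepBE_keys, List.map_cons]
    rfl

lemma pvBFold_getD (lst l : List ((Int × Int) × Int))
    (d : PySem.Dict (Int × Int) (List Int)) (hsh : pvShape d) (k : Int × Int) :
    (l.foldl (pvStepB (pvTotD lst)) d).getD k [] =
      if d.contains k then
        pvUpd (d.getD k []) (pvQ (pvS 1 k lst) k l) (pvQ (pvS 3 k lst) k l)
      else if k ∈ l.map Prod.fst then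
        [pvFst k l + pvQ (pvS 1 k lst) k l, pvFst k l + pvQ (pvS 3 k lst) k l, pvFst k l]
      else [] := by
  induction l generalizing d with
  | nil =>
    by_cases h : d.contains k
    · obtain ⟨a, b, e, he⟩ := hsh k h
      simp [h, he, pvUpd, pvQ]
    · simp [h, pvQ, PySem.Dict.getD_of_not_contains _ _ (by simpa using h)]
  | cons pc rest ih =>
    rw [List.foldl_cons, ih _ (pvStepBE_shape _ _ _ hsh),
      pvStepBE_contains, pvStepBE_getD _ _ _ hsh]
    by_cases hk : k = pc.1
    · have hb : (k == pc.1) = true := beq_iff_eq.mpr hk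
      by_cases h : d.contains k
      · have hc1 : d.contains pc.1 = true := hk ▸ h
        obtain ⟨a, b, e, he⟩ := hsh k h
        rw [if_pos (by simp [hb]), if_pos hk, if_neg (by simp [hc1]), if_pos h, he]
        simp [pvUpd, pvQ_cons, hk]
        omega
      · have hc1 : d.contains pc.1 = false := by
          rw [← hk]; simpa using h
        rw [if_pos (by simp [hb]), if_pos hk, if_pos (by simp [hc1]),
          PySem.Dict.getD_insert, if_pos hk, if_neg h, if_pos (by simp [hk])]
        simp [pvUpd, pvQ_cons, pvFst_cons, hk]
        omega
    · have hb : (k == pc.1) = false := beq_eq_false_iff_ne.mpr hk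
      have hk' : ¬ pc.1 = k := fun hh => hk hh.symm
      rw [if_neg hk]
      by_cases h : d.contains k
      · rw [if_pos (by simp [h, hb]), if_pos h]
        simp [pvUpd, pvQ_cons, hk']
      · rw [if_neg (by simp [h, hb]), if_neg h]
        by_cases hm : k ∈ rest.map Prod.fst
        · rw [if_pos hm, if_pos (by simp [hm])]
          simp [pvQ_cons, pvFst_cons, hk']
        · rw [if_neg hm, if_neg (by simp [hm]; exact hk)]

-- ---- A: step and loop invariants ----
lemma pvInit_contains (c : (Int × Int) × Int) (d : PySem.Dict (Int × Int) (List Int))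
    (k : Int × Int) :
    (pvInit c d).contains k = (d.contains k || (k == c.1)) := by
  unfold pvInit
  by_cases h : d.contains c.1
  · rw [if_neg (by simp [PySem.Dict.get?_eq_none_iff_contains, h])]
    by_cases hk : k = c.1 <;> simp [hk, h]
  · rw [if_pos (by simp [PySem.Dict.get?_eq_none_iff_contains]; simpa using h)]
    simp [PySem.Dict.contains_insert, Bool.or_comm]

lemma pvInit_getD (c : (Int × Int) × Int) (d : PySem.Dict (Int × Int) (List Int))
    (k : Int × Int) :
    (pvInit c d).getD k [] =
      if d.contains k = false ∧ k = c.1 then [c.2, c.2, c.2] else d.getD k [] := by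
  unfold pvInit
  by_cases h : d.contains c.1
  · rw [if_neg (by simp [PySem.Dict.get?_eq_none_iff_contains, h])]
    split_ifs with hcase
    · obtain ⟨h1, h2⟩ := hcase
      rw [h2] at h1
      rw [h1] at h
      exact absurd h (by simp)
    · rfl
  · rw [if_pos (by simp [PySem.Dict.get?_eq_none_iff_contains]; simpa using h)]
    rw [PySem.Dict.getD_insert]
    by_cases hk : k = c.1
    · rw [if_pos hk, if_pos ⟨by rw [hk]; simpa using h, hk⟩]
    · rw [if_neg hk, if_neg (by intro hh; exact hk hh.2)]

lemma pvInit_shape (c : (Int × Int) × Int) (d : PySem.Dict (Int × Int) (List Int))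
    (hsh : pvShape d) : pvShape (pvInit c d) := by
  intro k hk
  rw [pvInit_getD]
  split_ifs
  · exact ⟨_, _, _, rfl⟩
  · rw [pvInit_contains] at hk
    rcases Bool.or_eq_true_iff.mp hk with h | h
    · exact hsh k h
    · rename_i hcase
      by_cases hdk : d.contains k
      · exact hsh k hdk
      · exact absurd ⟨by simpa using hdk, beq_iff_eq.mp h⟩ hcase

lemma pvPair_contains (d1 : PySem.Dict (Int × Int) (List Int)) (p q k : Int × Int)
    (f g : List Int → List Int) (hp : d1.contains p = true) (hq : d1.contains q = true) :
    ((d1.modify p [] f).modify q [] g).contains k = d1.contains k := by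
  simp only [PySem.Dict.contains_modify]
  by_cases hkq : k = q
  · subst hkq; simp [hq]
  · have hbq : (k == q) = false := beq_eq_false_iff_ne.mpr hkq
    by_cases hkp : k = p
    · subst hkp; simp [hbq, hp]
    · have hbp : (k == p) = false := beq_eq_false_iff_ne.mpr hkp
      simp [hbq, hbp]

lemma pvPair1_getD (d1 : PySem.Dict (Int × Int) (List Int)) (hsh1 : pvShape d1)
    (p q : Int × Int) (hp : d1.contains p = true) (hq : d1.contains q = true)
    (x y : Int) (k : Int × Int) :
    ((d1.modify p [] (fun v => pvBump v 1 x)).modify q [] (fun v => pvBump v 1 y)).getD k [] =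
      if d1.contains k then
        pvUpd (d1.getD k []) 0 ((if k = p then x else 0) + (if k = q then y else 0))
      else [] := by
  simp only [PySem.Dict.getD_modify]
  by_cases hkq : k = q
  · subst hkq
    by_cases hqp : k = p
    · subst hqp
      obtain ⟨a, b, e, he⟩ := hsh1 k hp
      simp [he, pvBump1, hp, pvUpd] <;> omega
    · obtain ⟨a, b, e, he⟩ := hsh1 k hq
      simp [hqp, he, pvBump1, hq, pvUpd] <;> omega
  · by_cases hkp : k = p
    · subst hkp
      obtain ⟨a, b, e, he⟩ := hsh1 k hp
      simp [hkq, he, pvBump1, hp, pvUpd] <;> omega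
    · by_cases hdk : d1.contains k
      · obtain ⟨a, b, e, he⟩ := hsh1 k hdk
        simp [hkq, hkp, hdk, he, pvUpd]
      · simp [hkq, hkp, hdk, PySem.Dict.getD_of_not_contains _ _ (by simpa using hdk)]

lemma pvPair0_getD (d1 : PySem.Dict (Int × Int) (List Int)) (hsh1 : pvShape d1)
    (p q : Int × Int) (hp : d1.contains p = true) (hq : d1.contains q = true)
    (x y : Int) (k : Int × Int) :
    ((d1.modify p [] (fun v => pvBump v 0 x)).modify q [] (fun v => pvBump v 0 y)).getD k [] =
      if d1.contains k then
        pvUpd (d1.getD k []) ((if k = p then x else 0) + (if k = q then y else 0)) 0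
      else [] := by
  simp only [PySem.Dict.getD_modify]
  by_cases hkq : k = q
  · subst hkq
    by_cases hqp : k = p
    · subst hqp
      obtain ⟨a, b, e, he⟩ := hsh1 k hp
      simp [he, pvBump0, hp, pvUpd] <;> omega
    · obtain ⟨a, b, e, he⟩ := hsh1 k hq
      simp [hqp, he, pvBump0, hq, pvUpd] <;> omega
  · by_cases hkp : k = p
    · subst hkp
      obtain ⟨a, b, e, he⟩ := hsh1 k hp
      simp [hkq, he, pvBump0, hp, pvUpd] <;> omega
    · by_cases hdk : d1.contains k
      · obtain ⟨a, b, e, he⟩ := hsh1 k hdk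
        simp [hkq, hkp, hdk, he, pvUpd]
      · simp [hkq, hkp, hdk, PySem.Dict.getD_of_not_contains _ _ (by simpa using hdk)]

lemma pvPair1_shape (d1 : PySem.Dict (Int × Int) (List Int)) (hsh1 : pvShape d1)
    (p q : Int × Int) (hp : d1.contains p = true) (hq : d1.contains q = true) (x y : Int) :
    pvShape ((d1.modify p [] (fun v => pvBump v 1 x)).modify q [] (fun v => pvBump v 1 y)) := by
  intro k hk
  rw [pvPair1_getD d1 hsh1 p q hp hq x y k,
    if_pos (by rwa [pvPair_contains d1 p q k _ _ hp hq] at hk)]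
  exact ⟨_, _, _, rfl⟩

lemma pvStepA_contains (c cj : (Int × Int) × Int) (d : PySem.Dict (Int × Int) (List Int))
    (hc : d.contains c.1 = true) (k : Int × Int) :
    (pvStepA c d cj).contains k = (d.contains k || (k == cj.1)) := by
  have hc1 : (pvInit cj d).contains c.1 = true := by simp [pvInit_contains, hc]
  have hcj : (pvInit cj d).contains cj.1 = true := by simp [pvInit_contains]
  have h2 : ∀ d2 : PySem.Dict (Int × Int) (List Int),
      d2.contains c.1 = true → d2.contains cj.1 = true →
      ∀ s x y, ((d2.modify c.1 [] (fun v => pvBump v s x)).modify cj.1 []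
        (fun v => pvBump v s y)).contains k = d2.contains k := by
    intro d2 h1 h2' s x y
    exact pvPair_contains d2 c.1 cj.1 k _ _ h1 h2'
  unfold pvStepA
  by_cases n3 : pvNear 3 c.1 cj.1 <;> by_cases n1 : pvNear 1 c.1 cj.1 <;>
    simp only [n3, n1, if_true, if_false, Bool.false_eq_true, ite_true, ite_false] <;>
    rw [← pvInit_contains cj d k] <;>
    (try rw [h2 _ (by rwa [pvPair_contains _ _ _ _ _ _ hc1 hcj]) (by rwa [pvPair_contains _ _ _ _ _ _ hc1 hcj]),
             h2 _ hc1 hcj]) <;>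
    (try rw [h2 _ hc1 hcj])

lemma pvStepA_getD (c cj : (Int × Int) × Int) (d : PySem.Dict (Int × Int) (List Int))
    (hsh : pvShape d) (hc : d.contains c.1 = true) (k : Int × Int) :
    (pvStepA c d cj).getD k [] =
      if (pvInit cj d).contains k then
        pvUpd ((pvInit cj d).getD k [])
          ((if pvNear 1 c.1 cj.1 then (if k = c.1 then cj.2 else 0) + (if k = cj.1 then c.2 else 0) else 0))
          ((if pvNear 3 c.1 cj.1 then (if k = c.1 then cj.2 else 0) + (if k = cj.1 then c.2 else 0) else 0))
      else [] := by
  have hsh1 : pvShape (pvInit cj d) := pvInit_shape cj d hsh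
  have hc1 : (pvInit cj d).contains c.1 = true := by simp [pvInit_contains, hc]
  have hcj : (pvInit cj d).contains cj.1 = true := by simp [pvInit_contains]
  unfold pvStepA
  by_cases n3 : pvNear 3 c.1 cj.1 <;> by_cases n1 : pvNear 1 c.1 cj.1 <;>
    simp only [n3, n1, if_true, if_false, Bool.false_eq_true, ite_true, ite_false]
  · rw [pvPair0_getD _ (pvPair1_shape _ hsh1 _ _ hc1 hcj _ _) _ _
      (by rwa [pvPair_contains _ _ _ _ _ _ hc1 hcj])
      (by rwa [pvPair_contains _ _ _ _ _ _ hc1 hcj]),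
      pvPair_contains _ _ _ _ _ _ hc1 hcj,
      pvPair1_getD _ hsh1 _ _ hc1 hcj]
    by_cases hdk : (pvInit cj d).contains k
    · simp [hdk, pvUpd_upd]
    · simp [hdk]
  · rw [pvPair1_getD _ hsh1 _ _ hc1 hcj]
  · rw [pvPair0_getD _ hsh1 _ _ hc1 hcj]
  · by_cases hdk : (pvInit cj d).contains k
    · obtain ⟨a, b, e, he⟩ := hsh1 k hdk
      simp [hdk, he, pvUpd]
    · simp [hdk, PySem.Dict.getD_of_not_contains _ _ (by simpa using hdk)]

lemma pvStepA_shape (c cj : (Int × Int) × Int) (d : PySem.Dict (Int × Int) (List Int))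
    (hsh : pvShape d) (hc : d.contains c.1 = true) : pvShape (pvStepA c d cj) := by
  intro k hk
  rw [pvStepA_getD c cj d hsh hc k]
  rw [pvStepA_contains c cj d hc, ← pvInit_contains cj d k] at hk
  rw [if_pos hk]
  exact ⟨_, _, _, rfl⟩

lemma pvStepA_keys (c cj : (Int × Int) × Int) (d : PySem.Dict (Int × Int) (List Int))
    (hc : d.contains c.1 = true) :
    (pvStepA c d cj).keys = PySem.Set.add d.keys cj.1 := by
  have hc1 : (pvInit cj d).contains c.1 = true := by simp [pvInit_contains, hc]
  have hcj : (pvInit cj d).contains cj.1 = true := by simp [pvInit_contains]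
  have hkeys1 : ∀ (dd : PySem.Dict (Int × Int) (List Int)) (p : Int × Int)
      (f : List Int → List Int), dd.contains p = true → (dd.modify p [] f).keys = dd.keys := by
    intro dd p f hp
    rw [PySem.Dict.keys_modify, PySem.Dict.keys_insert_of_contains _ _ hp]
  have hinitkeys : (pvInit cj d).keys = PySem.Set.add d.keys cj.1 := by
    unfold pvInit
    by_cases h : d.contains cj.1
    · rw [if_neg (by simp [PySem.Dict.get?_eq_none_iff_contains, h]), PySem.Set.add,
        if_pos (by rw [PySem.Dict.contains_eq_decide_mem_keys] at h; simpa using h)]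
    · rw [if_pos (by simp [PySem.Dict.get?_eq_none_iff_contains]; simpa using h),
        PySem.Dict.keys_insert_of_not_contains _ _ (by simpa using h), PySem.Set.add,
        if_neg (by rw [PySem.Dict.contains_eq_decide_mem_keys] at h; simpa using h)]
  unfold pvStepA
  by_cases n3 : pvNear 3 c.1 cj.1 <;> by_cases n1 : pvNear 1 c.1 cj.1 <;>
    simp only [n3, n1, if_true, if_false, Bool.false_eq_true, ite_true, ite_false] <;>
    rw [← hinitkeys] <;>
    (try rw [hkeys1 _ _ _ (by simp [PySem.Dict.contains_modify, hcj]),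
         hkeys1 _ _ _ (by simp [PySem.Dict.contains_modify, hc1])]) <;>
    (try rw [hkeys1 _ _ _ (by simp [PySem.Dict.contains_modify, hcj]),
         hkeys1 _ _ _ (by simp [PySem.Dict.contains_modify, hc1])])

lemma pvIA_cons (r : Int) (c cj : (Int × Int) × Int) (k : Int × Int)
    (rest : List ((Int × Int) × Int)) :
    pvIA r c k (cj :: rest) =
      (if pvNear r c.1 cj.1 then (if k = c.1 then cj.2 else 0) + (if k = cj.1 then c.2 else 0) else 0) +
        pvIA r c k rest := by
  unfold pvIA
  have hS : pvS r c.1 (cj :: rest) =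
      (if pvNear r c.1 cj.1 then cj.2 else 0) + pvS r c.1 rest := by simp [pvS]
  have hC : pvCnt k (cj :: rest) = (if cj.1 = k then 1 else 0) + pvCnt k rest := by
    unfold pvCnt
    rw [List.map_cons, List.count_cons]
    by_cases h : cj.1 = k
    · rw [if_pos (beq_iff_eq.mpr h), if_pos h]
      push_cast
      ring
    · rw [if_neg (by simp [h]), if_neg h]
      push_cast
      ring
  rw [hS, hC]
  by_cases hkc : k = c.1
  · by_cases hkj : k = cj.1
    · have hcc : cj.1 = c.1 := hkj ▸ hkc
      simp only [hkj, hcc]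
      by_cases hn : pvNear r c.1 c.1 = true <;> simp [hn] <;> ring
    · have hjc : ¬ cj.1 = c.1 := fun hh => hkj (hkc.trans hh.symm)
      have hcj2 : ¬ c.1 = cj.1 := fun hh => hjc hh.symm
      simp only [hkc]
      by_cases hn : pvNear r c.1 cj.1 = true <;>
        by_cases hm : pvNear r c.1 c.1 = true <;>
          simp [hn, hm, hjc, hcj2] <;> ring
  · by_cases hkj : k = cj.1
    · have hjc : ¬ cj.1 = c.1 := fun hh => hkc (hkj.trans hh)
      simp only [hkj]
      by_cases hn : pvNear r c.1 cj.1 = true <;> simp [hn, hjc] <;> ring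
    · have hjc : ¬ cj.1 = k := fun hh => hkj hh.symm
      by_cases hm : pvNear r c.1 k = true <;>
        by_cases hn : pvNear r c.1 cj.1 = true <;>
          simp [hkc, hkj, hjc, hn, hm] <;> ring

lemma pvInnerA_contains (c : (Int × Int) × Int) (rest : List ((Int × Int) × Int))
    (d : PySem.Dict (Int × Int) (List Int)) (hc : d.contains c.1 = true) (k : Int × Int) :
    (pvInnerA c rest d).contains k = (d.contains k || decide (k ∈ rest.map Prod.fst)) := by
  induction rest generalizing d with
  | nil => simp [pvInnerA]
  | cons cj rest' ih =>
    have hc' : (pvStepA c d cj).contains c.1 = true := by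
      rw [pvStepA_contains c cj d hc]
      simp [hc]
    simp only [pvInnerA, List.foldl_cons] at *
    rw [ih _ hc', pvStepA_contains c cj d hc]
    by_cases hk : k = cj.1
    · simp [hk]
    · have hb : (k == cj.1) = false := beq_eq_false_iff_ne.mpr hk
      have hmm : (k ∈ List.map Prod.fst (cj :: rest')) ↔ (k ∈ List.map Prod.fst rest') := by
        simp [hk]
      have hd : decide (k ∈ List.map Prod.fst (cj :: rest')) =
          decide (k ∈ List.map Prod.fst rest') := decide_eq_decide.mpr hmm
      rw [hd]
      simp [hb]

lemma pvInnerA_shape (c : (Int × Int) × Int) (rest : List ((Int × Int) × Int))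
    (d : PySem.Dict (Int × Int) (List Int)) (hsh : pvShape d) (hc : d.contains c.1 = true) :
    pvShape (pvInnerA c rest d) := by
  induction rest generalizing d with
  | nil => exact hsh
  | cons cj rest' ih =>
    simp only [pvInnerA, List.foldl_cons] at *
    exact ih _ (pvStepA_shape c cj d hsh hc)
      (by rw [pvStepA_contains c cj d hc]; simp [hc])

lemma pvInnerA_keys (c : (Int × Int) × Int) (rest : List ((Int × Int) × Int))
    (d : PySem.Dict (Int × Int) (List Int)) (hc : d.contains c.1 = true) :
    (pvInnerA c rest d).keys = PySem.Set.update d.keys (rest.map Prod.fst) := by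
  induction rest generalizing d with
  | nil => rfl
  | cons cj rest' ih =>
    simp only [pvInnerA, List.foldl_cons] at *
    rw [ih _ (by rw [pvStepA_contains c cj d hc]; simp [hc]), pvStepA_keys c cj d hc]
    rfl

lemma pvInnerA_getD (c : (Int × Int) × Int) (rest : List ((Int × Int) × Int))
    (d : PySem.Dict (Int × Int) (List Int)) (hsh : pvShape d) (hc : d.contains c.1 = true)
    (k : Int × Int) :
    (pvInnerA c rest d).getD k [] =
      if d.contains k then
        pvUpd (d.getD k []) (pvIA 1 c k rest) (pvIA 3 c k rest)
      else if k ∈ rest.map Prod.fst then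
        [pvFst k rest + pvIA 1 c k rest, pvFst k rest + pvIA 3 c k rest, pvFst k rest]
      else [] := by
  induction rest generalizing d with
  | nil =>
    by_cases h : d.contains k
    · obtain ⟨a, b, e, he⟩ := hsh k h
      simp [pvInnerA, pvIA, pvS, pvCnt, h, he, pvUpd]
    · simp [pvInnerA, h, PySem.Dict.getD_of_not_contains _ _ (by simpa using h)]
  | cons cj rest' ih =>
    have hc' : (pvStepA c d cj).contains c.1 = true := by
      rw [pvStepA_contains c cj d hc]; simp [hc]
    simp only [pvInnerA, List.foldl_cons] at *
    rw [ih _ (pvStepA_shape c cj d hsh hc) hc',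
      pvStepA_contains c cj d hc, pvStepA_getD c cj d hsh hc,
      pvIA_cons 1 c cj k rest', pvIA_cons 3 c cj k rest']
    by_cases hdk : d.contains k
    · have h1 : (pvInit cj d).contains k = true := by simp [pvInit_contains, hdk]
      rw [if_pos (by simp [hdk]), if_pos h1, if_pos hdk,
        pvInit_getD, if_neg (by rintro ⟨h, _⟩; rw [hdk] at h; exact absurd h (by simp)),
        pvUpd_upd]
    · by_cases hk : k = cj.1
      · have h1 : (pvInit cj d).contains k = true := by simp [pvInit_contains, hk]
        rw [if_pos (by simp [beq_iff_eq.mpr hk]), if_pos h1, if_neg hdk,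
          pvInit_getD, if_pos ⟨by simpa using hdk, hk⟩,
          if_pos (show k ∈ List.map Prod.fst (cj :: rest') by
            rw [List.map_cons]; exact List.mem_cons.mpr (Or.inl hk)),
          pvUpd_upd, pvFst_cons, if_pos hk.symm]
        simp [pvUpd]
      · have hb : (k == cj.1) = false := beq_eq_false_iff_ne.mpr hk
        rw [if_neg (by simp [hdk, hb]), if_neg hdk]
        have hIAz : ∀ r : Int,
            (if pvNear r c.1 cj.1 then (if k = c.1 then cj.2 else 0) + (if k = cj.1 then c.2 else 0) else 0) = 0 := by
          intro r
          have hkc : ¬ k = c.1 := fun hh => by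
            rw [hh] at hdk; exact hdk hc
          simp [hkc, hk]
        rw [hIAz 1, hIAz 3, zero_add, zero_add]
        by_cases hm : k ∈ rest'.map Prod.fst
        · rw [if_pos hm, if_pos (show k ∈ List.map Prod.fst (cj :: rest') by
            rw [List.map_cons]; exact List.mem_cons.mpr (Or.inr hm)),
            pvFst_cons, if_neg (fun hh => hk hh.symm)]
        · rw [if_neg hm, if_neg (show ¬ k ∈ List.map Prod.fst (cj :: rest') by
            rw [List.map_cons]
            intro hmem
            rcases List.mem_cons.mp hmem with h | h
            · exact hk h
            · exact hm h)]

lemma pvSet_add_mem {s : PySem.Set (Int × Int)} {y : Int × Int} (h : y ∈ s) :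
    PySem.Set.add s y = s := by
  rw [PySem.Set.add, if_pos (show s.contains y = true from List.elem_eq_true_of_mem h)]

lemma pvSet_update_self (xs : List (Int × Int)) :
    ∀ s : PySem.Set (Int × Int), (∀ x ∈ xs, x ∈ s) → PySem.Set.update s xs = s := by
  induction xs with
  | nil => intro s _; rfl
  | cons x xs ih =>
    intro s hmem
    rw [show PySem.Set.update s (x :: xs) = PySem.Set.update (PySem.Set.add s x) xs from rfl,
      pvSet_add_mem (hmem x (by simp))]
    exact ih s (fun z hz => hmem z (by simp [hz]))

lemma pvSet_update_update (s : PySem.Set (Int × Int)) (xs : List (Int × Int)) :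
    PySem.Set.update (PySem.Set.update s xs) xs = PySem.Set.update s xs := by
  apply pvSet_update_self
  intro x hx
  exact (PySem.Set.mem_update s xs x).mpr (Or.inr hx)

lemma pvARec_keys (lst : List ((Int × Int) × Int))
    (d : PySem.Dict (Int × Int) (List Int)) :
    (pvARec lst d).keys = PySem.Set.update d.keys (lst.map Prod.fst) := by
  induction lst generalizing d with
  | nil => rfl
  | cons c rest ih =>
    have hc1 : (pvInit c d).contains c.1 = true := by simp [pvInit_contains]
    have hik : (pvInit c d).keys = PySem.Set.add d.keys c.1 := by
      unfold pvInit
      by_cases h : d.contains c.1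
      · rw [if_neg (by simp [PySem.Dict.get?_eq_none_iff_contains, h]), PySem.Set.add,
          if_pos (by rw [PySem.Dict.contains_eq_decide_mem_keys] at h; simpa using h)]
      · rw [if_pos (by simp [PySem.Dict.get?_eq_none_iff_contains]; simpa using h),
          PySem.Dict.keys_insert_of_not_contains _ _ (by simpa using h), PySem.Set.add,
          if_neg (by rw [PySem.Dict.contains_eq_decide_mem_keys] at h; simpa using h)]
    rw [show pvARec (c :: rest) d = pvARec rest (pvInnerA c rest (pvInit c d)) from rfl,
      ih, pvInnerA_keys c rest _ hc1, hik, List.map_cons]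
    rw [show PySem.Set.update d.keys (c.1 :: List.map Prod.fst rest) =
      PySem.Set.update (PySem.Set.add d.keys c.1) (List.map Prod.fst rest) from rfl]
    exact pvSet_update_update _ _

lemma pvARec_getD (lst : List ((Int × Int) × Int))
    (d : PySem.Dict (Int × Int) (List Int)) (hsh : pvShape d) (k : Int × Int) :
    (pvARec lst d).getD k [] =
      if d.contains k then
        pvUpd (d.getD k []) (pvPA 1 k lst) (pvPA 3 k lst)
      else if k ∈ lst.map Prod.fst then
        [pvFst k lst + pvPA 1 k lst, pvFst k lst + pvPA 3 k lst, pvFst k lst]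
      else [] := by
  induction lst generalizing d with
  | nil =>
    by_cases h : d.contains k
    · obtain ⟨a, b, e, he⟩ := hsh k h
      simp [pvARec, pvPA, h, he, pvUpd]
    · simp [pvARec, pvPA, h, PySem.Dict.getD_of_not_contains _ _ (by simpa using h)]
  | cons c rest ih =>
    have hc1 : (pvInit c d).contains c.1 = true := by simp [pvInit_contains]
    have hsh1 : pvShape (pvInit c d) := pvInit_shape c d hsh
    have hsh2 : pvShape (pvInnerA c rest (pvInit c d)) := pvInnerA_shape c rest _ hsh1 hc1
    rw [show pvARec (c :: rest) d = pvARec rest (pvInnerA c rest (pvInit c d)) from rfl,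
      ih _ hsh2, pvInnerA_contains c rest _ hc1, pvInnerA_getD c rest _ hsh1 hc1,
      pvInit_contains, pvInit_getD]
    rw [show pvPA 1 k (c :: rest) = pvIA 1 c k rest + pvPA 1 k rest from rfl,
      show pvPA 3 k (c :: rest) = pvIA 3 c k rest + pvPA 3 k rest from rfl]
    by_cases hdk : d.contains k
    · rw [if_pos (by simp [hdk]), if_pos (by simp [hdk]),
        if_neg (by rintro ⟨h, _⟩; rw [hdk] at h; exact absurd h (by simp)),
        if_pos hdk, pvUpd_upd]
    · by_cases hk : k = c.1
      · rw [if_pos (by simp [beq_iff_eq.mpr hk]), if_pos (by simp [beq_iff_eq.mpr hk]),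
          if_pos ⟨by simpa using hdk, hk⟩, if_neg hdk,
          if_pos (show k ∈ List.map Prod.fst (c :: rest) by
            rw [List.map_cons]; exact List.mem_cons.mpr (Or.inl hk)),
          pvUpd_upd, pvFst_cons, if_pos hk.symm]
        simp [pvUpd]
      · have hb : (k == c.1) = false := beq_eq_false_iff_ne.mpr hk
        rw [if_neg hdk, if_neg (show ¬ (d.contains k = false ∧ k = c.1) by
          rintro ⟨_, h⟩; exact hk h)]
        by_cases hm : k ∈ rest.map Prod.fst
        · have hdm : decide (k ∈ List.map Prod.fst rest) = true := by simpa using hm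
          rw [if_pos (by simp [hdm]), if_neg (by simp [hb]; simpa using hdk),
            if_pos hm,
            if_pos (show k ∈ List.map Prod.fst (c :: rest) by
              rw [List.map_cons]; exact List.mem_cons.mpr (Or.inr hm)),
            pvFst_cons, if_neg (fun hh => hk hh.symm)]
          simp [pvUpd]
          omega
        · rw [if_neg (by simp [hb, hm]; simpa using hdk), if_neg hm,
            if_neg (show ¬ k ∈ List.map Prod.fst (c :: rest) by
              rw [List.map_cons]
              intro hmem
              rcases List.mem_cons.mp hmem with h | h
              · exact hk h
              · exact hm h)]

-- ---- bridges from the ports to the structural loops ----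
lemma pvOuterA (xs : List ((Int × Int) × Int)) :
    ∀ (n a : Nat) (d : PySem.Dict (Int × Int) (List Int)), xs.length - a = n →
    (PySem.List.pyRange (a : Int) (PySem.List.len xs) 1).foldl (fun d i =>
      (PySem.List.pyRange (i + 1) (PySem.List.len xs) 1).foldl (fun d j =>
        pvStepA (PySem.List.pyGetD xs i ((0, 0), 0)) d (PySem.List.pyGetD xs j ((0, 0), 0)))
        (pvInit (PySem.List.pyGetD xs i ((0, 0), 0)) d)) d =
      pvARec (xs.drop a) d := by
  intro n
  induction n with
  | zero =>
    intro a d h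
    rw [PySem.List.pyRange_one_eq_nil (by simp only [PySem.List.len_eq]; omega),
      List.drop_eq_nil_of_le (by omega)]
    rfl
  | succ n ih =>
    intro a d h
    have ha : a < xs.length := by omega
    rw [PySem.List.pyRange_one_cons
      (show (a : Int) < PySem.List.len xs by simp only [PySem.List.len_eq]; exact_mod_cast ha)]
    rw [List.foldl_cons]
    rw [show ((a : Int) + 1) = ((a + 1 : Nat) : Int) by push_cast; ring]
    rw [PySem.List.foldl_pyRange_pyGetD xs ((0, 0), 0)
      (pvStepA (PySem.List.pyGetD xs ((a : Nat) : Int) ((0, 0), 0))) _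
      (show (0 : Int) ≤ ((a + 1 : Nat) : Int) by positivity)]
    rw [ih (a + 1) _ (by omega)]
    rw [show (((a + 1 : Nat) : Int)).toNat = a + 1 from Int.toNat_natCast _]
    rw [PySem.List.pyGetD_natCast xs a ((0, 0), 0), List.getD_eq_getElem xs _ ha,
      List.drop_eq_getElem_cons ha]
    rfl

lemma pvBridgeA (lst : List ((Int × Int) × Int)) :
    calculate_rs lst = (pvARec lst PySem.Dict.empty).items := by
  have h := pvOuterA lst lst.length 0 PySem.Dict.empty (by omega)
  simp only [Nat.cast_zero, List.drop_zero] at h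
  show ((PySem.List.pyRange 0 (PySem.List.len lst) 1).foldl (fun d i =>
      (PySem.List.pyRange (i + 1) (PySem.List.len lst) 1).foldl (fun d j =>
        pvStepA (PySem.List.pyGetD lst i ((0, 0), 0)) d (PySem.List.pyGetD lst j ((0, 0), 0)))
        (pvInit (PySem.List.pyGetD lst i ((0, 0), 0)) d)) PySem.Dict.empty).items =
    (pvARec lst PySem.Dict.empty).items
  rw [h]

lemma pvBridgeB (lst : List ((Int × Int) × Int)) :
    calculate_rs_alt lst = (lst.foldl (pvStepB (pvTotD lst)) PySem.Dict.empty).items := by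
  rfl

-- ---- each side equals the common target ----
lemma pvShape_empty : pvShape (PySem.Dict.empty) := by
  intro k h
  rw [PySem.Dict.contains_empty] at h
  cases h

lemma pvA_eq_target (lst : List ((Int × Int) × Int)) : calculate_rs lst = pvTarget lst := by
  rw [pvBridgeA]
  have hkeys : (pvARec lst PySem.Dict.empty).keys = PySem.Set.ofList (lst.map Prod.fst) := by
    rw [pvARec_keys, PySem.Dict.keys_empty, PySem.Set.update_nil_left]
  have hnd : (pvARec lst PySem.Dict.empty).keys.Nodup := by
    rw [hkeys]; exact PySem.Set.nodup_ofList _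
  rw [PySem.Dict.items_eq_map_keys _ hnd [], hkeys]
  unfold pvTarget
  apply List.map_congr_left
  intro k hkmem
  have hmem : k ∈ lst.map Prod.fst := (PySem.Set.mem_ofList _ _).mp hkmem
  rw [pvARec_getD lst _ pvShape_empty k,
    if_neg (by simp [PySem.Dict.contains_empty]), if_pos hmem,
    pvPA_closed 1 (by norm_num) k lst, pvPA_closed 3 (by norm_num) k lst]
  unfold pvVal
  simp only [Prod.mk.injEq, List.cons.injEq, and_true, true_and]
  refine ⟨by ring, by ring⟩

lemma pvB_eq_target (lst : List ((Int × Int) × Int)) : calculate_rs_alt lst = pvTarget lst := by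
  rw [pvBridgeB]
  have hkeys : (lst.foldl (pvStepB (pvTotD lst)) PySem.Dict.empty).keys =
      PySem.Set.ofList (lst.map Prod.fst) := by
    rw [pvBFold_keys, PySem.Dict.keys_empty, PySem.Set.update_nil_left]
  have hnd : (lst.foldl (pvStepB (pvTotD lst)) PySem.Dict.empty).keys.Nodup := by
    rw [hkeys]; exact PySem.Set.nodup_ofList _
  rw [PySem.Dict.items_eq_map_keys _ hnd [], hkeys]
  unfold pvTarget
  apply List.map_congr_left
  intro k hkmem
  have hmem : k ∈ lst.map Prod.fst := (PySem.Set.mem_ofList _ _).mp hkmem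
  rw [pvBFold_getD lst lst _ pvShape_empty k,
    if_neg (by simp [PySem.Dict.contains_empty]), if_pos hmem,
    pvQ_closed (pvS 1 k lst) k lst, pvQ_closed (pvS 3 k lst) k lst]
  unfold pvVal
  simp only [Prod.mk.injEq, List.cons.injEq, and_true, true_and]
  refine ⟨by ring, by ring⟩

-- ===== VERDICT (by name: the statement is the Claim_ definition above) =====
theorem calculate_rs_spec : Claim_equal_calculate_rs := by
  intro lst _
  unfold Spec_calculate_rs
  rw [pvA_eq_target, pvB_eq_target]
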